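-- pv_equiv track=rewrite | github.com/JakeCob/Ilokano-to-Tagalog-Machince-Translation | module/il_tl/doc_trans_smt_il/__init__.py | inFPhrases
-- ===== SOURCE A (Python) =====
-- def inFPhrases(word, word2, word3, word4, il_phrases):
--     inFPhrases = False
--     il_phrase = []
--     w_used = 0
--     for phrase in il_phrases:
--         length = len(phrase)
--         if length == 1:
--             if word == phrase[0]:
--                 inFPhrases = True
--                 il_phrase = phrase
--                 w_used = 1
--         if length == 2:
--             if word == phrase[0] and word2 == phrase[1]:
--                 inFPhrases = True
--                 il_phrase = phrase
--                 w_used = 2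
--         if length == 3:
--             if word == phrase[0] and word2 == phrase[1] and word3 == phrase[2]:
--                 inFPhrases = True
--                 il_phrase = phrase
--                 w_used = 3
--         if length == 4:
--             if word == phrase[0] and word2 == phrase[1] and word3 == phrase[2] and word4 == phrase[3]:
--                 inFPhrases = True
--                 il_phrase = phrase
--                 w_used = 4
--
--     return inFPhrases, il_phrase, w_used
-- ===== SOURCE B (Python) =====
-- def inFPhrases(word, word2, word3, word4, il_phrases):
--     # Index pass: map each phrase (as a tuple) to its last occurrence (index, phrase).
--     last = {}
--     for i, phrase in enumerate(il_phrases):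
--         last[tuple(phrase)] = (i, phrase)
--     # Lookup pass: the four possible word prefixes; keep the one occurring latest.
--     words = (word, word2, word3, word4)
--     best = None
--     for L in (1, 2, 3, 4):
--         entry = last.get(words[:L])
--         if entry is not None and (best is None or entry[0] > best[0]):
--             best = entry
--     if best is None:
--         return False, [], 0
--     return True, best[1], len(best[1])
-- ===== Notes on version B (the rewrite author's own statement) =====
-- stated objective: alternative
-- what changed: B replaces A's single scan with four length-branch comparisons per phrase by two staged passes: one pass builds a hash index from each phrase to its last occurrence index, then the result is chosen as the latest-indexed of the four prefix lookups, so no per-phrase prefix comparison happens at all.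
import Mathlib
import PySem

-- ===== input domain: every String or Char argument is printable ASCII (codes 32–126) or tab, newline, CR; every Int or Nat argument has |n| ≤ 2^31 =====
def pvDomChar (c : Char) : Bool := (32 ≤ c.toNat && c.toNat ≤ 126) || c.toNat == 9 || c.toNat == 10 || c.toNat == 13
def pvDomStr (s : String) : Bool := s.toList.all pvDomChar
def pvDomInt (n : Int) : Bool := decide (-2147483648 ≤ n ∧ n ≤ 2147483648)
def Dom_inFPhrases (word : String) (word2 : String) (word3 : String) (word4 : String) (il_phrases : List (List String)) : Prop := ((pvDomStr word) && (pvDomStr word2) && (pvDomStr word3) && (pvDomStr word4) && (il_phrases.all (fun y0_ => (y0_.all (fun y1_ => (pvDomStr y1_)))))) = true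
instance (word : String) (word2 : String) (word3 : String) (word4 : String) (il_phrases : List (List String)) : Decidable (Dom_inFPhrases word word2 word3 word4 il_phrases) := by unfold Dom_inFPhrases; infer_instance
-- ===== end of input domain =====

-- B replaces A's single scan with four per-length comparison branches by two staged passes: a hash index from phrase to its last occurrence index, then the latest-indexed of the four prefix lookups (objective: alternative).


-- ===== PORT A =====
-- one for-loop iteration of A: four sequential length-guarded overwrite blocks, in A's order
def stepA (word : String) (word2 : String) (word3 : String) (word4 : String)
    (s : Bool × List String × Int) (phrase : List String) : Bool × List String × Int :=
  let length := phrase.length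
  let s := if length = 1 then
      (if PySem.List.pyGet? phrase 0 = some word then (true, phrase, (1 : Int)) else s)
    else s
  let s := if length = 2 then
      (if PySem.List.pyGet? phrase 0 = some word ∧ PySem.List.pyGet? phrase 1 = some word2 then
        (true, phrase, (2 : Int)) else s)
    else s
  let s := if length = 3 then
      (if PySem.List.pyGet? phrase 0 = some word ∧ PySem.List.pyGet? phrase 1 = some word2 ∧
          PySem.List.pyGet? phrase 2 = some word3 then (true, phrase, (3 : Int)) else s)
    else s
  let s := if length = 4 then
      (if PySem.List.pyGet? phrase 0 = some word ∧ PySem.List.pyGet? phrase 1 = some word2 ∧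
          PySem.List.pyGet? phrase 2 = some word3 ∧ PySem.List.pyGet? phrase 3 = some word4 then
        (true, phrase, (4 : Int)) else s)
    else s
  s

def inFPhrases (word : String) (word2 : String) (word3 : String) (word4 : String) (il_phrases : List (List String)) : Bool × List String × Int :=
  il_phrases.foldl (stepA word word2 word3 word4) (false, [], 0)

-- ===== PORT B =====
-- Source B's index pass: last[tuple(phrase)] = (i, phrase) over enumerate(il_phrases)
def buildLast (il_phrases : List (List String)) : PySem.Dict (List String) (Int × List String) :=
  (PySem.List.enumerate il_phrases 0).foldl (fun d ip => d.insert ip.2 (ip.1, ip.2)) PySem.Dict.empty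

-- Source B's lookup-pass body: if entry is not None and (best is None or entry[0] > best[0]): best = entry
def bestStep (acc : Option (Int × List String)) (o : Option (Int × List String)) : Option (Int × List String) :=
  match o with
  | none => acc
  | some e =>
    match acc with
    | none => some e
    | some b => if e.1 > b.1 then some e else acc

def inFPhrases_alt (word : String) (word2 : String) (word3 : String) (word4 : String) (il_phrases : List (List String)) : Bool × List String × Int :=
  let last := buildLast il_phrases
  let ws := [word, word2, word3, word4]
  let best := [1, 2, 3, 4].foldl (fun acc L => bestStep acc (last.get? (ws.take L))) none
  match best with
  | none => (false, [], 0)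
  | some b => (true, b.2, (b.2.length : Int))

-- ===== PRECONDITION & SPEC =====
def Spec_inFPhrases (word : String) (word2 : String) (word3 : String) (word4 : String) (il_phrases : List (List String)) (out : Bool × List String × Int) : Prop := out = inFPhrases_alt word word2 word3 word4 il_phrases
instance (word : String) (word2 : String) (word3 : String) (word4 : String) (il_phrases : List (List String)) (out : Bool × List String × Int) : Decidable (Spec_inFPhrases word word2 word3 word4 il_phrases out) := by unfold Spec_inFPhrases; infer_instance

-- ===== CLAIM (what is proved, stated in full; the proofs are below) =====
def Claim_equal_inFPhrases : Prop := ∀ (word : String) (word2 : String) (word3 : String) (word4 : String) (il_phrases : List (List String)), Dom_inFPhrases word word2 word3 word4 il_phrases → Spec_inFPhrases word word2 word3 word4 il_phrases (inFPhrases word word2 word3 word4 il_phrases)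

-- ===== LEMMAS AND PROOFS =====
-- the hit condition: phrase p matches the corresponding word prefix
def hits (word word2 word3 word4 : String) (p : List String) : Bool :=
  decide (1 ≤ p.length ∧ p.length ≤ 4 ∧ p = ([word, word2, word3, word4].take p.length))

theorem stepA_eq (word word2 word3 word4 : String) (s : Bool × List String × Int)
    (p : List String) :
    stepA word word2 word3 word4 s p =
      if hits word word2 word3 word4 p then (true, p, (p.length : Int)) else s := by
  match p with
  | [] => simp [stepA, hits]
  | [a] =>
    simp only [stepA, hits, PySem.List.pyGet?, PySem.List.pyIdx?, List.length_cons,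
      List.length_nil, decide_eq_true_eq, List.take, List.cons.injEq, and_true]
    norm_num
  | [a, b] =>
    simp only [stepA, hits, PySem.List.pyGet?, PySem.List.pyIdx?, List.length_cons,
      List.length_nil, decide_eq_true_eq, List.take, List.cons.injEq, and_true]
    norm_num
  | [a, b, c] =>
    simp only [stepA, hits, PySem.List.pyGet?, PySem.List.pyIdx?, List.length_cons,
      List.length_nil, decide_eq_true_eq, List.take, List.cons.injEq, and_true]
    norm_num
    split_ifs <;> simp_all
  | [a, b, c, d] =>
    simp only [stepA, hits, PySem.List.pyGet?, PySem.List.pyIdx?, List.length_cons,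
      List.length_nil, decide_eq_true_eq, List.take, List.cons.injEq, and_true]
    norm_num
    split_ifs <;> simp_all
  | a :: b :: c :: d :: e :: t =>
    have hh : hits word word2 word3 word4 (a :: b :: c :: d :: e :: t) = false := by
      simp only [hits, decide_eq_false_iff_not, List.length_cons]
      omega
    simp [stepA, hh]

-- dict index pass over xs ++ [p] ends with one overwrite at key p
theorem buildLast_append (xs : List (List String)) (p : List String) :
    buildLast (xs ++ [p]) = (buildLast xs).insert p ((xs.length : Int), p) := by
  simp [buildLast, PySem.List.enumerate_append, List.foldl_append, PySem.List.enumerate_cons,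
    PySem.List.enumerate_nil]

-- every value stored by the index pass has its key as payload and index < length
theorem buildLast_inv (xs : List (List String)) (k : List String) (i : Int) (q : List String)
    (h : (buildLast xs).get? k = some (i, q)) : i < (xs.length : Int) ∧ q = k := by
  induction xs using List.reverseRecOn generalizing i q with
  | nil => simp [buildLast, PySem.List.enumerate_nil] at h
  | append_singleton xs p ih =>
    rw [buildLast_append, PySem.Dict.get?_insert] at h
    by_cases hk : k = p
    · rw [if_pos hk] at h
      simp only [Option.some.injEq, Prod.mk.injEq] at h
      refine ⟨?_, by simp [h.2, hk]⟩
      simp [← h.1]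
    · rw [if_neg hk] at h
      obtain ⟨hlt, hq⟩ := ih _ _ h
      refine ⟨by simp; omega, hq⟩

-- bounded options: any stored entry has index < n
def Bnd (o : Option (Int × List String)) (n : Int) : Prop := ∀ e, o = some e → e.1 < n

theorem bestStep_bnd {a o : Option (Int × List String)} {n : Int}
    (ha : Bnd a n) (ho : Bnd o n) : Bnd (bestStep a o) n := by
  cases o with
  | none => simpa [bestStep] using ha
  | some e =>
    cases a with
    | none => simpa [bestStep] using ho
    | some b =>
      simp only [bestStep]
      split_ifs
      · exact ho
      · exact ha

theorem bestStep_hit {a : Option (Int × List String)} {n : Int} {p : List String}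
    (ha : Bnd a n) : bestStep a (some (n, p)) = some (n, p) := by
  cases a with
  | none => rfl
  | some b =>
    have := ha b rfl
    simp only [bestStep]
    rw [if_pos (by exact this)]

theorem bestStep_keep {o : Option (Int × List String)} {n : Int} {p : List String}
    (ho : Bnd o n) : bestStep (some (n, p)) o = some (n, p) := by
  cases o with
  | none => rfl
  | some e =>
    have := ho e rfl
    simp only [bestStep]
    rw [if_neg (by omega)]

theorem take_len (ws : List String) (hws : ws.length = 4) (L : Nat) (hL : L ≤ 4) :
    (ws.take L).length = L := by
  simp [hws]; omega

-- ===== VERDICT helper: main equivalence by reverse induction =====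
theorem main_eq (word word2 word3 word4 : String) (l : List (List String)) :
    inFPhrases word word2 word3 word4 l = inFPhrases_alt word word2 word3 word4 l := by
  induction l using List.reverseRecOn with
  | nil => rfl
  | append_singleton xs p ih =>
    have hws : ([word, word2, word3, word4] : List String).length = 4 := rfl
    set ws : List String := [word, word2, word3, word4] with hwsdef
    have hA : inFPhrases word word2 word3 word4 (xs ++ [p]) =
        if hits word word2 word3 word4 p then (true, p, (p.length : Int))
        else inFPhrases word word2 word3 word4 xs := by
      rw [inFPhrases, List.foldl_append]
      simp only [List.foldl_cons, List.foldl_nil]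
      rw [stepA_eq]
      rfl
    set n : Int := (xs.length : Int) with hn
    have hbnd : ∀ L : Int, Bnd ((buildLast xs).get? (ws.take L.toNat)) n := by
      intro L e he
      cases e with
      | mk i q => exact (buildLast_inv xs _ i q he).1
    by_cases hh : hits word word2 word3 word4 p = true
    · -- hit: the appended phrase is some word prefix, B's best becomes (n, p)
      have hp := of_decide_eq_true hh
      obtain ⟨h1, h4, hpe⟩ := hp
      have hB : ∀ k, Bnd ((buildLast xs).get? k) n := by
        intro k e he
        cases e with
        | mk i q => exact (buildLast_inv xs k i q he).1
      have h0 : Bnd none n := by intro e he; cases he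
      -- candidates of other lengths differ from p (different lengths)
      have hne : ∀ L : Nat, L ≤ 4 → L ≠ p.length → ws.take L ≠ p := by
        intro L hL hLne heq
        exact hLne (by rw [← heq, take_len ws hws L hL])
      have hget : ∀ L : Nat, L ≤ 4 →
          ((buildLast (xs ++ [p])).get? (ws.take L)) =
            if L = p.length then some (n, p)
            else (buildLast xs).get? (ws.take L) := by
        intro L hL
        rw [buildLast_append, PySem.Dict.get?_insert]
        by_cases hLp : L = p.length
        · rw [if_pos hLp, if_pos (by rw [hLp, ← hpe])]
        · rw [if_neg hLp, if_neg (hne L hL hLp)]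
      rw [hA, if_pos hh]
      show _ = inFPhrases_alt word word2 word3 word4 (xs ++ [p])
      simp only [inFPhrases_alt, List.foldl_cons, List.foldl_nil]
      rw [hget 1 (by omega), hget 2 (by omega), hget 3 (by omega), hget 4 (by omega)]
      have hcase : p.length = 1 ∨ p.length = 2 ∨ p.length = 3 ∨ p.length = 4 := by omega
      rcases hcase with hplen | hplen | hplen | hplen <;>
        rw [hplen] <;> norm_num
      · rw [bestStep_hit h0, bestStep_keep (hB _), bestStep_keep (hB _), bestStep_keep (hB _)]
        simp [hplen]
      · rw [bestStep_hit (bestStep_bnd h0 (hB _)), bestStep_keep (hB _), bestStep_keep (hB _)]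
        simp [hplen]
      · rw [bestStep_hit (bestStep_bnd (bestStep_bnd h0 (hB _)) (hB _)), bestStep_keep (hB _)]
        simp [hplen]
      · rw [bestStep_hit (bestStep_bnd (bestStep_bnd (bestStep_bnd h0 (hB _)) (hB _)) (hB _))]
        simp [hplen]
    · -- no hit: the appended phrase is no word prefix; B's lookups are unchanged
      have hh' : hits word word2 word3 word4 p = false := by simpa using hh
      have hne : ∀ L : Nat, 1 ≤ L → L ≤ 4 → ws.take L ≠ p := by
        intro L h1 h4 heq
        have hlen : p.length = L := by rw [← heq, take_len ws hws L h4]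
        have : hits word word2 word3 word4 p = true := by
          apply decide_eq_true
          exact ⟨by omega, by omega, by rw [hlen, heq]⟩
        rw [hh'] at this; exact absurd this (by simp)
      rw [hA, if_neg (by simp [hh']), ih]
      simp only [inFPhrases_alt]
      simp only [List.foldl_cons, List.foldl_nil]
      rw [buildLast_append]
      rw [PySem.Dict.get?_insert, if_neg (hne 1 (by omega) (by omega)),
          PySem.Dict.get?_insert, if_neg (hne 2 (by omega) (by omega)),
          PySem.Dict.get?_insert, if_neg (hne 3 (by omega) (by omega)),
          PySem.Dict.get?_insert, if_neg (hne 4 (by omega) (by omega))]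

-- ===== VERDICT (by name: the statement is the Claim_ definition above) =====
theorem inFPhrases_spec : Claim_equal_inFPhrases := by
  intro word word2 word3 word4 il_phrases _
  show inFPhrases word word2 word3 word4 il_phrases = inFPhrases_alt word word2 word3 word4 il_phrases
  exact main_eq word word2 word3 word4 il_phrases
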